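-- pv_equiv track=rewrite | github.com/EliasAroni2000/automatas | Aroni-tp1-v2.py | tokenMayor
-- ===== SOURCE A (Python) =====
-- estado_final = "estado final"
--
-- estadoNoFinal = "estado no aceptado"
--
-- estadoTrampa = "estado trampa"
--
-- def tokenMayor(lexema):
--     estado = 0
--     estadoFinal = [1]
--     caracter = {0:{'>':1},1:{}}
--     for c in lexema:
--         if c in caracter[estado]:
--             estado = caracter[estado][c]
--         else:
--             estado = -1
--             break
--     if estado == -1:
--         return estadoTrampa
--     if estado in estadoFinal:
--         return estado_final
--     else:
--         return estadoNoFinal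
-- ===== SOURCE B (Python) =====
-- estado_final = "estado final"
-- estadoNoFinal = "estado no aceptado"
-- estadoTrampa = "estado trampa"
--
-- def tokenMayor(lexema):
--     # Closed form: the DFA accepts exactly ">"; "" stays at the non-final start state.
--     if lexema == ">":
--         return estado_final
--     if lexema == "":
--         return estadoNoFinal
--     return estadoTrampa
-- ===== Notes on version B (the rewrite author's own statement) =====
-- stated objective: simpler
-- what changed: Replaced the transition-table DFA simulation loop with a direct three-way string comparison (">" -> final, "" -> non-final, anything else -> trap).
import Mathlib
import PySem

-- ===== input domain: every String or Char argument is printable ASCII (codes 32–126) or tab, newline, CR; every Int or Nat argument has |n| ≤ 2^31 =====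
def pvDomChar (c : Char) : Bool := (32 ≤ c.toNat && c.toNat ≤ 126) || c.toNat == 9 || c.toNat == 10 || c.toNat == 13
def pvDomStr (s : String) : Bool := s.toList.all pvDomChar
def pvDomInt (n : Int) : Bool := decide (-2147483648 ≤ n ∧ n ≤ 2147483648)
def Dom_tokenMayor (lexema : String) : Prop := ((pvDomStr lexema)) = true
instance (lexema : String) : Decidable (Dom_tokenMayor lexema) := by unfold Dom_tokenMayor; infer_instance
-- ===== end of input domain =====

-- B replaces the DFA transition-table loop by a direct three-way string comparison (objective: simpler).

-- ===== PORT A =====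
-- the module constants
def pvEstadoFinalStr : String := "estado final"
def pvEstadoNoFinalStr : String := "estado no aceptado"
def pvEstadoTrampaStr : String := "estado trampa"

-- caracter = {0:{'>':1},1:{}}
def pvCaracter : PySem.Dict Int (PySem.Dict Char Int) :=
  PySem.Dict.ofList [(0, PySem.Dict.ofList [('>', 1)]), (1, PySem.Dict.ofList [])]

-- the for-loop over lexema with the break-on-missing-transition
def pvRun : Int → List Char → Int
  | estado, [] => estado
  | estado, c :: cs =>
      match (PySem.Dict.getD pvCaracter estado PySem.Dict.empty).get? c with
      | some e => pvRun e cs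
      | none => -1          -- estado = -1; break

def tokenMayor (lexema : String) : String :=
  let estado : Int := pvRun 0 lexema.toList
  let estadoFinal : List Int := [1]
  if estado = -1 then pvEstadoTrampaStr
  else if estado ∈ estadoFinal then pvEstadoFinalStr
  else pvEstadoNoFinalStr

-- ===== PORT B =====
def tokenMayor_alt (lexema : String) : String :=
  if lexema = ">" then "estado final"
  else if lexema = "" then "estado no aceptado"
  else "estado trampa"

-- ===== PRECONDITION & SPEC =====
def Spec_tokenMayor (lexema : String) (out : String) : Prop := out = tokenMayor_alt lexema
instance (lexema : String) (out : String) : Decidable (Spec_tokenMayor lexema out) := by unfold Spec_tokenMayor; infer_instance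

-- ===== CLAIM (what is proved, stated in full; the proofs are below) =====
def Claim_equal_tokenMayor : Prop := ∀ (lexema : String), Dom_tokenMayor lexema → Spec_tokenMayor lexema (tokenMayor lexema)

-- ===== LEMMAS AND PROOFS =====

-- items of the literal transition dicts
theorem pvItems_gt : (PySem.Dict.ofList [('>', (1:Int))]).items = [('>', (1:Int))] := rfl
theorem pvItems_empty : (PySem.Dict.ofList ([] : List (Char × Int))).items = [] := rfl

-- At state 1 the transition dict is empty, so any further character traps.
theorem pvCaracter_zero : PySem.Dict.getD pvCaracter 0 PySem.Dict.empty = PySem.Dict.ofList [('>', 1)] := rfl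
theorem pvCaracter_one : PySem.Dict.getD pvCaracter 1 PySem.Dict.empty = PySem.Dict.ofList [] := rfl

theorem pvRun_one (l : List Char) : pvRun 1 l = if l = [] then 1 else -1 := by
  cases l <;> simp [pvRun, pvCaracter_one, pvItems_empty, PySem.Dict.get?]

-- Characterisation of the DFA run from the start state.
theorem pvRun_zero (l : List Char) :
    pvRun 0 l = if l = [] then 0 else if l = ['>'] then 1 else -1 := by
  cases l with
  | nil => simp [pvRun]
  | cons c cs =>
    by_cases h : c = '>'
    · subst h
      have hstep : pvRun 0 ('>' :: cs) = pvRun 1 cs := rfl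
      rw [hstep, pvRun_one]
      rcases cs with _ | _ <;> simp
    · have hnone : (PySem.Dict.get? (PySem.Dict.getD pvCaracter 0 PySem.Dict.empty) c) = none := by
        rw [pvCaracter_zero]
        simp [PySem.Dict.get?, pvItems_gt]
        exact fun e => h e.symm
      simp only [pvRun, hnone]
      simp
      exact fun e => absurd e h

-- ===== VERDICT (by name: the statement is the Claim_ definition above) =====
theorem tokenMayor_spec : Claim_equal_tokenMayor := by
  intro lexema _
  show tokenMayor lexema = tokenMayor_alt lexema
  have hempty : (lexema = "") = (lexema.toList = []) := by
    rw [← String.toList_inj]; rfl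
  have hgt : (lexema = ">") = (lexema.toList = ['>']) := by
    rw [← String.toList_inj]; rfl
  simp only [tokenMayor, tokenMayor_alt, pvRun_zero, hempty, hgt,
    pvEstadoFinalStr, pvEstadoNoFinalStr, pvEstadoTrampaStr]
  by_cases h0 : lexema.toList = [] <;> by_cases h1 : lexema.toList = ['>'] <;> simp_all
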